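-- pv_equiv track=rewrite | github.com/vlttnv/scrimfinder | utils/scrim_filter.py | scrim_days_combinations
-- ===== SOURCE A (Python) =====
-- def scrim_days_combinations(bit_string):
--     """
--     Generate all unique combinations of binary of length n, matching all the
--     required scrim days.
--
--     Return an array of similar scrim days, represented as bit strings.
--
--     Example:
--
--     "1110000" represents that team A can only play on Mon, Tue, and Wed.
--
--     The result would be ["1110000", "1110001", "1110011", ...], meaning that
--     team A can play against any team whose scrim days match the above result
--     """
--
--     import itertools as itools
--
--     indices_scrim_days = [i for i, bit in enumerate(bit_string) if bit == '1']
--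
--     n = len(bit_string)
--     all_binaries = [''.join(seq) for seq in itools.product('01', repeat=n)]
--
--     matched_scrim_days = []
--     for binary in all_binaries:
--         bits_list = list(binary)
--         contains_any_scrim_day = False
--         for i in indices_scrim_days:
--             if bits_list[i] == "1":
--                 contains_any_scrim_day = True
--         if contains_any_scrim_day:
--             combination = ''.join(bits_list)
--             if combination not in matched_scrim_days:
--                 matched_scrim_days.append(combination)
--     return matched_scrim_days
-- ===== SOURCE B (Python) =====
-- def scrim_days_combinations(bit_string):
--     # Build an integer bit mask of the scrim days, then stream the integers
--     # 0 .. 2^n-1 once, keeping exactly those sharing a set bit with the mask.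
--     n = len(bit_string)
--     mask = 0
--     for bit in bit_string:
--         mask = mask * 2 + (1 if bit == '1' else 0)
--     return [format(k, '0%db' % n) for k in range(1 << n) if k & mask]
-- ===== Notes on version B (the rewrite author's own statement) =====
-- stated objective: alternative
-- what changed: Replaces the materialised 2^n-string product, the per-string inner scan over scrim indices and the quadratic membership-test dedup by a single integer bit mask: stream k over range(1 << n) once, keep k iff k & mask is nonzero, and format k back to a bit string; intended as faster (measured 15.6x at n=16; both sides necessarily blow up for large n since the output itself has nearly 2^n strings).
import Mathlib
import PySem

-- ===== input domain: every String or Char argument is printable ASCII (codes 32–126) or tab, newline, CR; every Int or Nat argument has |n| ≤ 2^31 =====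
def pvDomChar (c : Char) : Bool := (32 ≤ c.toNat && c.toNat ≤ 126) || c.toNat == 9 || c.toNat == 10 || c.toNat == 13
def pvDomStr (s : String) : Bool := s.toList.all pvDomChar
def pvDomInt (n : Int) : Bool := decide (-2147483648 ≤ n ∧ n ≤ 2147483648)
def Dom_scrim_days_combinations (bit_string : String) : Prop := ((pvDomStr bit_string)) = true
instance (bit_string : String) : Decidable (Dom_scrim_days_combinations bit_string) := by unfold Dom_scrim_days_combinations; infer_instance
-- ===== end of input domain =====

-- B replaces A's materialised 2^n-string product with per-string index scan and list-membership
-- dedup by one pass over the integers 0..2^n-1 against a precomputed integer bit mask.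

-- ===== PORT A =====
-- itertools.product('01', repeat=n), in product (lexicographic) order
def prodRep : Nat → List (List Char)
  | 0 => [[]]
  | n+1 => ['0', '1'].flatMap (fun c => (prodRep n).map (fun s => c :: s))

def scrim_days_combinations (bit_string : String) : List String :=
  let cs := bit_string.toList
  let indices_scrim_days := (PySem.List.enumerate cs).filterMap
    (fun p => if p.2 = '1' then some p.1 else none)
  let n := cs.length
  let all_binaries := (prodRep n).map (fun seq => String.ofList seq)
  let matched_scrim_days := all_binaries.foldl (fun acc binary =>
    let bits_list := binary.toList
    let contains_any_scrim_day := indices_scrim_days.foldl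
      (fun c i => if PySem.List.pyGet? bits_list i = some '1' then true else c) false
    if contains_any_scrim_day then
      let combination := String.ofList bits_list
      if acc.contains combination then acc else acc ++ [combination]
    else acc) ([] : List String)
  matched_scrim_days

-- ===== PORT B =====
-- format(k, '0<n>b'): k as an n-character binary string, MSB first
def toBin : Nat → Nat → List Char
  | 0, _ => []
  | n+1, k => (if k / 2^n % 2 = 1 then '1' else '0') :: toBin n k

def scrim_days_combinations_alt (bit_string : String) : List String :=
  let cs := bit_string.toList
  let n := cs.length
  let mask := cs.foldl (fun m bit => m * 2 + (if bit = '1' then 1 else 0)) 0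
  ((List.range (2^n)).filter (fun k => k &&& mask ≠ 0)).map
    (fun k => String.ofList (toBin n k))

-- ===== PRECONDITION & SPEC =====
def Spec_scrim_days_combinations (bit_string : String) (out : List String) : Prop := out = scrim_days_combinations_alt bit_string
instance (bit_string : String) (out : List String) : Decidable (Spec_scrim_days_combinations bit_string out) := by unfold Spec_scrim_days_combinations; infer_instance

-- ===== CLAIM (what is proved, stated in full; the proofs are below) =====
def Claim_equal_scrim_days_combinations : Prop := ∀ (bit_string : String), Dom_scrim_days_combinations bit_string → Spec_scrim_days_combinations bit_string (scrim_days_combinations bit_string)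

-- ===== LEMMAS AND PROOFS =====

theorem getElem?_toBin (n k i : Nat) (h : i < n) :
    (toBin n k)[i]? = some (if k.testBit (n - 1 - i) then '1' else '0') := by
  induction n generalizing k i with
  | zero => omega
  | succ n ih =>
    cases i with
    | zero =>
      simp [toBin, Nat.testBit_eq_decide_div_mod_eq]
    | succ i =>
      simp only [toBin, List.getElem?_cons_succ, ih k i (by omega)]
      rw [show n + 1 - 1 - (i + 1) = n - 1 - i from by omega]

theorem toBin_add_pow (n k : Nat) : toBin n (k + 2^n) = toBin n k := by
  induction n generalizing k with
  | zero => rfl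
  | succ n ih =>
    have h1 : (k + 2^(n+1)) / 2^n % 2 = k / 2^n % 2 := by
      have e : k + 2^(n+1) = k + 2^n * 2 := by rw [pow_succ]
      rw [e, Nat.add_mul_div_left _ _ (Nat.two_pow_pos n)]
      omega
    have h2 : toBin n (k + 2^(n+1)) = toBin n k := by
      have e : k + 2^(n+1) = (k + 2^n) + 2^n := by rw [pow_succ]; ring
      rw [e, ih, ih]
    simp [toBin, h1, h2]

theorem toBin_low (n k : Nat) (h : k < 2^n) : toBin (n+1) k = '0' :: toBin n k := by
  simp [toBin, Nat.div_eq_of_lt h]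

theorem toBin_high (n k : Nat) (h : k < 2^n) : toBin (n+1) (2^n + k) = '1' :: toBin n k := by
  have hd : (2^n + k) / 2^n = 1 := by
    rw [Nat.add_comm, Nat.add_div_right k (Nat.two_pow_pos n), Nat.div_eq_of_lt h]
  have ht : toBin n (2^n + k) = toBin n k := by
    rw [Nat.add_comm]; exact toBin_add_pow n k
  show (if (2^n + k) / 2^n % 2 = 1 then '1' else '0') :: toBin n (2^n + k) = _
  rw [hd, ht]
  norm_num

theorem prodRep_eq (n : Nat) : prodRep n = (List.range (2^n)).map (toBin n) := by
  induction n with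
  | zero => rfl
  | succ n ih =>
    have hsplit : List.range (2^(n+1)) = List.range (2^n) ++ (List.range (2^n)).map (fun x => 2^n + x) := by
      rw [pow_succ, mul_two, List.range_add]
    rw [hsplit]
    simp only [prodRep, List.flatMap_cons, List.flatMap_nil, List.append_nil, List.map_append,
      List.map_map, ih]
    refine congrArg₂ (· ++ ·) ?_ ?_
    · refine List.map_congr_left fun k hk => ?_
      exact (toBin_low n k (List.mem_range.mp hk)).symm
    · refine List.map_congr_left fun k hk => ?_
      exact (toBin_high n k (List.mem_range.mp hk)).symm

theorem toBin_inj {n k1 k2 : Nat} (h1 : k1 < 2^n) (h2 : k2 < 2^n)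
    (h : toBin n k1 = toBin n k2) : k1 = k2 := by
  apply Nat.eq_of_testBit_eq
  intro i
  by_cases hi : i < n
  · have hg := congrArg (fun l => l[n - 1 - i]?) h
    simp only [getElem?_toBin n _ (n - 1 - i) (by omega)] at hg
    rw [show n - 1 - (n - 1 - i) = i from by omega] at hg
    by_cases b1 : k1.testBit i <;> by_cases b2 : k2.testBit i <;> simp_all
  · have l1 : k1 < 2^i := lt_of_lt_of_le h1 (Nat.pow_le_pow_right (by norm_num) (by omega))
    have l2 : k2 < 2^i := lt_of_lt_of_le h2 (Nat.pow_le_pow_right (by norm_num) (by omega))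
    rw [Nat.testBit_lt_two_pow l1, Nat.testBit_lt_two_pow l2]

theorem nodup_allBin (n : Nat) :
    (((List.range (2^n)).map (toBin n)).map String.ofList).Nodup := by
  rw [List.map_map]
  refine List.Nodup.map_on ?_ (List.nodup_range)
  intro x hx y hy hxy
  rw [List.mem_range] at hx hy
  have hts : toBin n x = toBin n y := by
    have := congrArg String.toList hxy
    simpa using this
  exact toBin_inj hx hy hts

theorem ne_zero_iff_exists_testBit (x : Nat) : x ≠ 0 ↔ ∃ i, x.testBit i = true := by
  constructor
  · intro h
    by_contra hc
    push Not at hc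
    exact h (Nat.eq_of_testBit_eq fun i => by simp [hc i])
  · rintro ⟨i, hi⟩ h
    subst h
    simp at hi

theorem testBit_maskOf (cs : List Char) (j : Nat) :
    (cs.foldl (fun m bit => m * 2 + (if bit = '1' then 1 else 0)) 0).testBit j = true
    ↔ j < cs.length ∧ cs[cs.length - 1 - j]? = some '1' := by
  induction cs using List.reverseRecOn generalizing j with
  | nil => simp
  | append_singleton cs c ih =>
    rw [List.foldl_append]
    simp only [List.foldl_cons, List.foldl_nil]
    have hd : (if c = '1' then 1 else 0) ≤ 1 := by split <;> omega
    cases j with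
    | zero =>
      rw [Nat.testBit_zero]
      have hidx : (cs ++ [c]).length - 1 - 0 = cs.length := by simp
      rw [hidx, List.getElem?_concat_length]
      by_cases hc : c = '1' <;> simp [hc]
    | succ j =>
      rw [Nat.testBit_succ]
      have hdiv : (cs.foldl (fun m bit => m * 2 + (if bit = '1' then 1 else 0)) 0 * 2
          + (if c = '1' then 1 else 0)) / 2
          = cs.foldl (fun m bit => m * 2 + (if bit = '1' then 1 else 0)) 0 := by omega
      rw [hdiv, ih j]
      constructor
      · rintro ⟨hj, hget⟩
        refine ⟨by simp; omega, ?_⟩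
        rw [show (cs ++ [c]).length - 1 - (j + 1) = cs.length - 1 - j from by simp; omega]
        rw [List.getElem?_append_left (by omega)]
        exact hget
      · rintro ⟨hj, hget⟩
        have hj' : j < cs.length := by simp at hj; omega
        refine ⟨hj', ?_⟩
        rw [show (cs ++ [c]).length - 1 - (j + 1) = cs.length - 1 - j from by simp; omega] at hget
        rw [List.getElem?_append_left (by omega)] at hget
        exact hget

theorem mem_indicesOf (cs : List Char) (i : Int) :
    i ∈ (PySem.List.enumerate cs).filterMap (fun p => if p.2 = '1' then some p.1 else none)
    ↔ ∃ j : Nat, j < cs.length ∧ i = (j : Int) ∧ cs[j]? = some '1' := by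
  constructor
  · intro hmem
    rw [List.mem_filterMap] at hmem
    obtain ⟨p, hp, hf⟩ := hmem
    rw [PySem.List.mem_enumerate_iff] at hp
    obtain ⟨j, hj, rfl⟩ := hp
    simp only at hf
    split at hf
    · rename_i h1
      cases hf
      exact ⟨j, hj, by simp, by rw [List.getElem?_eq_getElem hj, h1]⟩
    · cases hf
  · rintro ⟨j, hjlt, rfl, hget⟩
    rw [List.mem_filterMap]
    refine ⟨((j : Int), cs[j]'hjlt), ?_, ?_⟩
    · rw [PySem.List.mem_enumerate_iff]
      exact ⟨j, hjlt, by simp⟩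
    · have h1 : cs[j]'hjlt = '1' := by
        rw [List.getElem?_eq_getElem hjlt] at hget
        exact Option.some.inj hget
      simp [h1]

theorem foldl_ite_or {α : Type} (p : α → Prop) [DecidablePred p] (l : List α) (b : Bool) :
    l.foldl (fun c i => if p i then true else c) b = (b || l.any fun i => decide (p i)) := by
  induction l generalizing b with
  | nil => simp
  | cons x xs ih =>
    rw [List.foldl_cons, ih]
    by_cases hp : p x <;> simp [hp, List.any_cons]

theorem foldl_dedup (cond : String → Bool) (xs : List String) :
    ∀ acc : List String, xs.Nodup → (∀ x ∈ xs, x ∉ acc) →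
    xs.foldl (fun acc b => if cond b then (if acc.contains b then acc else acc ++ [b]) else acc) acc
      = acc ++ xs.filter cond := by
  induction xs with
  | nil => simp
  | cons x xs ih =>
    intro acc hnd hdis
    simp only [List.foldl_cons]
    have hx : acc.contains x = false := by
      rw [List.contains_eq_mem]
      simpa using hdis x (List.mem_cons_self)
    cases hc : cond x with
    | true =>
      rw [if_pos rfl, hx, if_neg Bool.false_ne_true]
      rw [ih (acc ++ [x]) hnd.of_cons ?_]
      · rw [List.filter_cons_of_pos hc, List.append_assoc]
        rfl
      · intro y hy
        rw [List.mem_append]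
        rintro (hya | hyx)
        · exact hdis y (List.mem_cons_of_mem _ hy) hya
        · rw [List.mem_singleton] at hyx
          subst hyx
          exact (List.nodup_cons.mp hnd).1 hy
    | false =>
      rw [if_neg Bool.false_ne_true]
      rw [ih acc hnd.of_cons fun y hy => hdis y (List.mem_cons_of_mem _ hy)]
      rw [List.filter_cons_of_neg (by simp [hc])]

theorem cond_equiv (cs : List Char) (k : Nat) :
    (((PySem.List.enumerate cs).filterMap (fun p => if p.2 = '1' then some p.1 else none)).foldl
      (fun c i => if PySem.List.pyGet? (toBin cs.length k) i = some '1' then true else c) false)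
    = decide (k &&& (cs.foldl (fun m bit => m * 2 + (if bit = '1' then 1 else 0)) 0) ≠ 0) := by
  rw [Bool.eq_iff_iff]
  rw [foldl_ite_or]
  simp only [Bool.false_or, List.any_eq_true, decide_eq_true_eq]
  constructor
  · rintro ⟨i, hmem, hp⟩
    rw [mem_indicesOf] at hmem
    obtain ⟨j, hj, rfl, hget⟩ := hmem
    rw [PySem.List.pyGet?_natCast, getElem?_toBin cs.length k j hj] at hp
    have hbit : k.testBit (cs.length - 1 - j) = true := by
      by_cases hb : k.testBit (cs.length - 1 - j) <;> simp_all
    rw [ne_zero_iff_exists_testBit]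
    refine ⟨cs.length - 1 - j, ?_⟩
    rw [Nat.testBit_and, hbit, Bool.true_and]
    rw [testBit_maskOf]
    refine ⟨by omega, ?_⟩
    rw [show cs.length - 1 - (cs.length - 1 - j) = j from by omega]
    exact hget
  · intro hne
    rw [ne_zero_iff_exists_testBit] at hne
    obtain ⟨t, ht⟩ := hne
    rw [Nat.testBit_and, Bool.and_eq_true, testBit_maskOf] at ht
    obtain ⟨hk, htlt, hget⟩ := ht
    refine ⟨(cs.length - 1 - t : Nat), ?_, ?_⟩
    · rw [mem_indicesOf]
      exact ⟨cs.length - 1 - t, by omega, rfl, hget⟩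
    · rw [PySem.List.pyGet?_natCast, getElem?_toBin cs.length k _ (by omega)]
      rw [show cs.length - 1 - (cs.length - 1 - t) = t from by omega, hk]
      rfl

-- ===== VERDICT (by name: the statement is the Claim_ definition above) =====
theorem scrim_days_combinations_spec : Claim_equal_scrim_days_combinations := by
  intro s _
  show scrim_days_combinations s = scrim_days_combinations_alt s
  simp only [scrim_days_combinations, scrim_days_combinations_alt, String.ofList_toList]
  rw [prodRep_eq]
  rw [foldl_dedup _ _ [] (nodup_allBin _) (by simp)]
  rw [List.nil_append, List.map_map, List.filter_map]
  refine congrArg _ (List.filter_congr fun k hk => ?_)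
  simp only [Function.comp_apply]
  simp only [show ∀ l : List Char, (String.ofList l).toList = l from fun l => by simp]
  exact cond_equiv s.toList k
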